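-- pv_equiv track=rewrite | github.com/yangzhch6/Pretrain_Bert | src/pre_data.py | cut_input
-- ===== SOURCE A (Python) =====
-- def cut_input(sentence, num_pos_, group_, separate_):
--     res = []
--     num_pos = num_pos_
--     group = group_
--     separate = separate_
--     idx = 0
--     for word in sentence:
--         if len(word) == 0:
--             # -------------------------------------
--             i = 0  # i负责遍历
--             while i < len(num_pos):
--                 if num_pos[i] == idx:
--                     num_pos.pop(i)
--                 elif num_pos[i] > idx:
--                     num_pos[i] -= 1
--                     i += 1
--                 else:
--                     i += 1
--             # -------------------------------------
--             i = 0
--             while i < len(group):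
--                 if group[i] == idx:
--                     group.pop(i)
--                 elif group[i] > idx:
--                     group[i] -= 1
--                     i += 1
--                 else:
--                     i += 1
--             # -------------------------------------
--             i = 0
--             while i < len(separate):
--                 if separate[i] == idx:
--                     separate.pop(i)
--                 elif separate[i] > idx:
--                     separate[i] -= 1
--                     i += 1
--                 else:
--                     i += 1
--             # -------------------------------------
--             continue
--         idx += 1
--
--     return num_pos, group, separate
-- ===== SOURCE B (Python) =====
-- def cut_input(sentence, num_pos_, group_, separate_):
--     # One pass over sentence: prefix counts of empty words + set of empty positions,
--     # then each index list is remapped in a single pass (no repeated inner scans).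
--     n = len(sentence)
--     pref = [0]
--     c = 0
--     empty_set = set()
--     for i, w in enumerate(sentence):
--         if len(w) == 0:
--             empty_set.add(i)
--             c += 1
--         pref.append(c)
--     total = pref[n]
--
--     def remap(lst):
--         out = []
--         for v in lst:
--             if v in empty_set:
--                 continue
--             d = total if v > n else (0 if v < 0 else pref[v])
--             out.append(v - d)
--         return out
--
--     return remap(num_pos_), remap(group_), remap(separate_)
-- ===== Notes on version B (the rewrite author's own statement) =====
-- stated objective: alternative
-- what changed: Instead of rescanning and mutating all three index lists once per empty word (pop/decrement passes), B makes one pass over the sentence to build a prefix count of empty words and a set of empty positions, then remaps each list in a single pass.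
import Mathlib
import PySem

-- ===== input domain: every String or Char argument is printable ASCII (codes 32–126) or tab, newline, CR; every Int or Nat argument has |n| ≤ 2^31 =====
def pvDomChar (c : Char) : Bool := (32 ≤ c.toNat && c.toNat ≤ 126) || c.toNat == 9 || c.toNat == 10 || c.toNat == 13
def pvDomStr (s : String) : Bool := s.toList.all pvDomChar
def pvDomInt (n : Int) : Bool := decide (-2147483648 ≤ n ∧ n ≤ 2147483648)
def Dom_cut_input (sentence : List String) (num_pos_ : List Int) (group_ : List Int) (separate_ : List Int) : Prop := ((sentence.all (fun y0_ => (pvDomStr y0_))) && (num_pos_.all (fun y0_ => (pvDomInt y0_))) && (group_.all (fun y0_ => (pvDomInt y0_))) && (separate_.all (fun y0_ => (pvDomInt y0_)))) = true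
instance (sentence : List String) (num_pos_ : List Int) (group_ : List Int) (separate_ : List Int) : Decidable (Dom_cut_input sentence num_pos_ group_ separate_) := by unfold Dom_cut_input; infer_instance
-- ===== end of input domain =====

-- B builds a prefix count of empty words and a set of empty positions in one pass and remaps
-- each index list in a single pass, instead of A's pop/decrement rescans once per empty word.
-- Python A mutates num_pos_/group_/separate_ in place; the equivalence proved here is about
-- the RETURN value only (B does not mutate).

-- ===== PORT A =====
-- the inner 'while i < len(...)' pop/decrement loop: each element is examined exactly once
-- (pop consumes it with i unchanged; otherwise i advances), so it is this structural recursion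
def pvStepA (idx : Int) : List Int → List Int
  | [] => []
  | x :: rest =>
    if x = idx then pvStepA idx rest
    else if x > idx then (x - 1) :: pvStepA idx rest
    else x :: pvStepA idx rest

def pvLoopA : List String → Int → List Int → List Int → List Int → List Int × List Int × List Int
  | [], _, np, g, s => (np, g, s)
  | w :: ws, idx, np, g, s =>
    if PySem.Str.len w = 0 then
      pvLoopA ws idx (pvStepA idx np) (pvStepA idx g) (pvStepA idx s)
    else
      pvLoopA ws (idx + 1) np g s

def cut_input (sentence : List String) (num_pos_ : List Int) (group_ : List Int) (separate_ : List Int) : List Int × List Int × List Int :=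
  pvLoopA sentence 0 num_pos_ group_ separate_

-- ===== PORT B =====
-- the build loop: state (pref, c, empty_set) over enumerate(sentence)
def pvBuildB (st : List Int × Int × PySem.Set Int) (iw : Int × String) : List Int × Int × PySem.Set Int :=
  let (pref, c, es) := st
  if PySem.Str.len iw.2 = 0 then (pref ++ [c + 1], c + 1, PySem.Set.add es iw.1)
  else (pref ++ [c], c, es)

-- remap's for-loop with out.append
def pvRemapB (n total : Int) (pref : List Int) (es : PySem.Set Int) (l : List Int) : List Int :=
  l.foldl (fun out v =>
    if PySem.Set.contains es v then out
    else out ++ [v - (if v > n then total else if v < 0 then 0 else PySem.List.pyGetD pref v 0)]) []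

def cut_input_alt (sentence : List String) (num_pos_ : List Int) (group_ : List Int) (separate_ : List Int) : List Int × List Int × List Int :=
  let n : Int := PySem.List.len sentence
  let st := (PySem.List.enumerate sentence).foldl pvBuildB ([0], 0, PySem.Set.empty)
  let pref := st.1
  let es := st.2.2
  let total : Int := PySem.List.pyGetD pref n 0
  (pvRemapB n total pref es num_pos_, pvRemapB n total pref es group_, pvRemapB n total pref es separate_)

-- ===== PRECONDITION & SPEC =====
def Spec_cut_input (sentence : List String) (num_pos_ : List Int) (group_ : List Int) (separate_ : List Int) (out : List Int × List Int × List Int) : Prop := out = cut_input_alt sentence num_pos_ group_ separate_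
instance (sentence : List String) (num_pos_ : List Int) (group_ : List Int) (separate_ : List Int) (out : List Int × List Int × List Int) : Decidable (Spec_cut_input sentence num_pos_ group_ separate_ out) := by unfold Spec_cut_input; infer_instance

-- ===== CLAIM (what is proved, stated in full; the proofs are below) =====
def Claim_equal_cut_input : Prop := ∀ (sentence : List String) (num_pos_ : List Int) (group_ : List Int) (separate_ : List Int), Dom_cut_input sentence num_pos_ group_ separate_ → Spec_cut_input sentence num_pos_ group_ separate_ (cut_input sentence num_pos_ group_ separate_)

-- ===== LEMMAS AND PROOFS =====

-- single-list version of A's outer loop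
def pvProcA : List String → Int → List Int → List Int
  | [], _, l => l
  | w :: ws, idx, l =>
    if PySem.Str.len w = 0 then pvProcA ws idx (pvStepA idx l)
    else pvProcA ws (idx + 1) l

-- the per-element effect of A's whole loop
def pvF : List String → Int → Int → Option Int
  | [], _, v => some v
  | w :: ws, idx, v =>
    if PySem.Str.len w = 0 then
      (if v = idx then none else if v > idx then pvF ws idx (v - 1) else pvF ws idx v)
    else pvF ws (idx + 1) v

-- absolute-position characterisations (B's view)
def pvEmptyAt : List String → Int → Bool
  | [], _ => false
  | w :: ws, u => if u = 0 then decide (PySem.Str.len w = 0) else pvEmptyAt ws (u - 1)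

def pvCnt : List String → Int → Int
  | [], _ => 0
  | w :: ws, u => if u ≤ 0 then 0 else (if PySem.Str.len w = 0 then 1 else 0) + pvCnt ws (u - 1)

-- pref tail produced by B's build loop
def pvPrefL : List String → Int → List Int
  | [], _ => []
  | w :: ws, c =>
    let c' := if PySem.Str.len w = 0 then c + 1 else c
    c' :: pvPrefL ws c'

theorem pvStepA_eq_filterMap (idx : Int) (l : List Int) :
    pvStepA idx l = l.filterMap (fun v => if v = idx then none else if v > idx then some (v - 1) else some v) := by
  induction l with
  | nil => simp [pvStepA]
  | cons x rest ih =>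
    simp only [pvStepA, List.filterMap_cons]
    split_ifs <;> simp [ih]


theorem pvLoopA_eq (ws : List String) (idx : Int) (np g s : List Int) :
    pvLoopA ws idx np g s = (pvProcA ws idx np, pvProcA ws idx g, pvProcA ws idx s) := by
  induction ws generalizing idx np g s with
  | nil => simp [pvLoopA, pvProcA]
  | cons w ws ih =>
    simp only [pvLoopA, pvProcA]
    split_ifs <;> simp [ih]


theorem pvProcA_eq_filterMap (ws : List String) (idx : Int) (l : List Int) :
    pvProcA ws idx l = l.filterMap (pvF ws idx) := by
  induction ws generalizing idx l with
  | nil => simp [pvProcA, pvF]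
  | cons w ws ih =>
    simp only [pvProcA, pvF]
    split_ifs with hw
    · rw [ih, pvStepA_eq_filterMap, List.filterMap_filterMap]
      congr 1
      funext v
      by_cases h1 : v = idx
      · simp [h1]
      · by_cases h2 : v > idx <;> simp [h1, h2]
    · exact ih _ _


theorem pvEmptyAt_neg (ws : List String) (u : Int) (h : u < 0) : pvEmptyAt ws u = false := by
  induction ws generalizing u with
  | nil => simp [pvEmptyAt]
  | cons w ws ih =>
    simp only [pvEmptyAt]
    rw [if_neg (by omega)]
    exact ih _ (by omega)


theorem pvCnt_nonpos (ws : List String) (u : Int) (h : u ≤ 0) : pvCnt ws u = 0 := by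
  cases ws with
  | nil => simp [pvCnt]
  | cons w ws => simp [pvCnt, h]


theorem pvCnt_ge (ws : List String) (u : Int) (h : (ws.length : Int) ≤ u) :
    pvCnt ws u = pvCnt ws (ws.length : Int) := by
  induction ws generalizing u with
  | nil => simp [pvCnt]
  | cons w ws ih =>
    have h' : (ws.length : Int) + 1 ≤ u := by simpa using h
    simp only [pvCnt, List.length_cons]
    have e : ((ws.length + 1 : Nat) : Int) - 1 = (ws.length : Int) := by push_cast; ring
    rw [ih (u - 1) (by omega), e]
    split_ifs <;> first | rfl | (exfalso; push_cast at *; omega)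

theorem pvF_closed (ws : List String) (idx v : Int) :
    pvF ws idx v = if idx ≤ v ∧ pvEmptyAt ws (v - idx) then none
                   else some (v - pvCnt ws (v - idx)) := by
  induction ws generalizing idx v with
  | nil => simp [pvF, pvEmptyAt, pvCnt]
  | cons w ws ih =>
    have hE : pvEmptyAt (w :: ws) (v - idx) =
        if v - idx = 0 then decide (PySem.Str.len w = 0) else pvEmptyAt ws (v - idx - 1) := rfl
    have hC : pvCnt (w :: ws) (v - idx) =
        if v - idx ≤ 0 then 0 else (if PySem.Str.len w = 0 then 1 else 0) + pvCnt ws (v - idx - 1) := rfl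
    show (if PySem.Str.len w = 0 then
        (if v = idx then none else if v > idx then pvF ws idx (v - 1) else pvF ws idx v)
      else pvF ws (idx + 1) v) = _
    rw [hE, hC]
    by_cases hw : PySem.Str.len w = 0
    · rw [if_pos hw]
      by_cases h1 : v = idx
      · have hw' : w = "" := by simpa using hw
        rw [if_pos h1, if_pos ⟨by omega, by rw [if_pos (by omega)]; simp [hw']⟩]
      · rw [if_neg h1]
        by_cases h2 : v > idx
        · rw [if_pos h2, ih]
          have e1 : v - 1 - idx = v - idx - 1 := by ring
          rw [e1]
          by_cases he : pvEmptyAt ws (v - idx - 1) = true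
          · rw [if_pos ⟨by omega, he⟩, if_pos ⟨by omega, by rw [if_neg (by omega)]; exact he⟩]
          · rw [if_neg (by rintro ⟨-, hx⟩; exact he hx),
                if_neg (by rintro ⟨-, hx⟩; rw [if_neg (by omega)] at hx; exact he hx)]
            rw [if_neg (by omega), if_pos hw]
            congr 1; ring
        · rw [if_neg h2, ih]
          rw [if_neg (by rintro ⟨hle, -⟩; omega), if_neg (by rintro ⟨hle, -⟩; omega),
              pvCnt_nonpos ws _ (by omega), if_pos (by omega)]
    · rw [if_neg hw, ih]
      have e2 : v - (idx + 1) = v - idx - 1 := by ring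
      rw [e2]
      by_cases h0 : v - idx ≤ 0
      · have hfalse : ¬ (idx ≤ v ∧ (if v - idx = 0 then decide (PySem.Str.len w = 0) else pvEmptyAt ws (v - idx - 1)) = true) := by
          rintro ⟨hle, hx⟩
          by_cases hz : v - idx = 0
          · rw [if_pos hz] at hx
            simp only [decide_eq_true_eq] at hx
            exact hw hx
          · rw [if_neg hz, pvEmptyAt_neg ws _ (by omega)] at hx
            simp at hx
        rw [if_neg (by rintro ⟨hle, -⟩; omega), if_neg hfalse,
            pvCnt_nonpos ws _ (by omega), if_pos h0]
      · by_cases he : pvEmptyAt ws (v - idx - 1) = true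
        · rw [if_pos ⟨by omega, he⟩, if_pos ⟨by omega, by rw [if_neg (by omega)]; exact he⟩]
        · rw [if_neg (by rintro ⟨-, hx⟩; exact he hx),
              if_neg (by rintro ⟨-, hx⟩; rw [if_neg (by omega)] at hx; exact he hx),
              if_neg (by omega), if_neg hw]
          congr 1; ring


-- B's build loop, characterised
theorem pvBuild_fst (ws : List String) (s : Int) (pref : List Int) (c : Int) (es : PySem.Set Int) :
    ((PySem.List.enumerate ws s).foldl pvBuildB (pref, c, es)).1 = pref ++ pvPrefL ws c := by
  induction ws generalizing s pref c es with
  | nil => simp [PySem.List.enumerate_nil, pvPrefL]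
  | cons w ws ih =>
    rw [PySem.List.enumerate_cons w ws s, List.foldl_cons]
    have hb : pvBuildB (pref, c, es) (s, w) =
        if PySem.Str.len w = 0 then (pref ++ [c + 1], c + 1, PySem.Set.add es s)
        else (pref ++ [c], c, es) := rfl
    rw [hb]
    by_cases hw : PySem.Str.len w = 0
    · have hw' : w = "" := by simpa using hw
      rw [if_pos hw, ih]
      simp [pvPrefL, hw', List.append_assoc]
    · have hw' : ¬ w = "" := by simpa using hw
      rw [if_neg hw, ih]
      simp [pvPrefL, hw', List.append_assoc]

theorem pvBuild_mem (ws : List String) (s : Int) (pref : List Int) (c : Int) (es : PySem.Set Int) (v : Int) :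
    (v ∈ ((PySem.List.enumerate ws s).foldl pvBuildB (pref, c, es)).2.2) ↔
      (v ∈ es ∨ pvEmptyAt ws (v - s) = true) := by
  induction ws generalizing s pref c es with
  | nil => simp [PySem.List.enumerate_nil, pvEmptyAt]
  | cons w ws ih =>
    rw [PySem.List.enumerate_cons w ws s, List.foldl_cons]
    have hb : pvBuildB (pref, c, es) (s, w) =
        if PySem.Str.len w = 0 then (pref ++ [c + 1], c + 1, PySem.Set.add es s)
        else (pref ++ [c], c, es) := rfl
    rw [hb]
    have hE : pvEmptyAt (w :: ws) (v - s) =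
        if v - s = 0 then decide (PySem.Str.len w = 0) else pvEmptyAt ws (v - s - 1) := rfl
    have e : v - (s + 1) = v - s - 1 := by ring
    by_cases hw : PySem.Str.len w = 0
    · rw [if_pos hw, ih, e, hE, PySem.Set.mem_add]
      by_cases hz : v - s = 0
      · have hv : v = s := by omega
        have hw' : w = "" := by simpa using hw
        simp [hv, hw']
      · have : ¬ v = s := by omega
        simp [hz, this]
    · rw [if_neg hw, ih, e, hE]
      by_cases hz : v - s = 0
      · rw [if_pos hz]
        rw [show v - s - 1 = -1 by omega, pvEmptyAt_neg ws (-1) (by omega)]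
        have hw' : ¬ w = "" := by simpa using hw
        simp [hw']
      · rw [if_neg hz]

theorem pvPrefL_getD (ws : List String) (c : Int) (k : Nat) (h : k ≤ ws.length) :
    (c :: pvPrefL ws c).getD k 0 = c + pvCnt ws (k : Int) := by
  induction ws generalizing c k with
  | nil =>
    have hk : k = 0 := by simpa using h
    subst hk
    simp [pvPrefL, pvCnt]
  | cons w ws ih =>
    cases k with
    | zero => simp [pvCnt]
    | succ k =>
      have hC : pvCnt (w :: ws) ((k + 1 : Nat) : Int) =
          if ((k + 1 : Nat) : Int) ≤ 0 then 0
          else (if PySem.Str.len w = 0 then 1 else 0) + pvCnt ws (((k + 1 : Nat) : Int) - 1) := rfl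
      rw [hC, if_neg (by push_cast; omega), show (((k + 1 : Nat) : Int) - 1) = (k : Int) by push_cast; ring]
      show ((if PySem.Str.len w = 0 then c + 1 else c) :: pvPrefL ws _).getD k 0 = _
      by_cases hw : PySem.Str.len w = 0
      · rw [if_pos hw, if_pos hw, ih (c + 1) k (by simpa using h)]
        ring
      · rw [if_neg hw, if_neg hw, ih c k (by simpa using h)]
        ring

theorem pvRemapB_eq (n total : Int) (pref : List Int) (es : PySem.Set Int) (l acc : List Int) :
    l.foldl (fun out v =>
      if PySem.Set.contains es v then out
      else out ++ [v - (if v > n then total else if v < 0 then 0 else PySem.List.pyGetD pref v 0)]) acc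
    = acc ++ l.filterMap (fun v =>
        if PySem.Set.contains es v then none
        else some (v - (if v > n then total else if v < 0 then 0 else PySem.List.pyGetD pref v 0))) := by
  induction l generalizing acc with
  | nil => simp
  | cons v l ih =>
    simp only [List.foldl_cons, List.filterMap_cons]
    by_cases hv : PySem.Set.contains es v = true
    · simp only [hv, if_true]
      exact ih acc
    · simp only [Bool.not_eq_true] at hv
      simp only [hv, Bool.false_eq_true, if_false]
      rw [ih]
      simp [List.append_assoc]

-- ===== VERDICT (by name: the statement is the Claim_ definition above) =====
theorem cut_input_spec : Claim_equal_cut_input := by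
  intro sentence np g sp _
  unfold Spec_cut_input cut_input cut_input_alt
  rw [pvLoopA_eq]
  have hfst : ((PySem.List.enumerate sentence 0).foldl pvBuildB ([0], 0, PySem.Set.empty)).1
      = 0 :: pvPrefL sentence 0 := by
    rw [pvBuild_fst]; rfl
  have hmem : ∀ v : Int,
      (PySem.Set.contains ((PySem.List.enumerate sentence 0).foldl pvBuildB ([0], 0, PySem.Set.empty)).2.2 v = true)
        ↔ pvEmptyAt sentence v = true := by
    intro v
    have h1 : (PySem.Set.contains ((PySem.List.enumerate sentence 0).foldl pvBuildB ([0], 0, PySem.Set.empty)).2.2 v = true)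
        ↔ v ∈ ((PySem.List.enumerate sentence 0).foldl pvBuildB ([0], 0, PySem.Set.empty)).2.2 := by
      simp [PySem.Set.contains]
    rw [h1, pvBuild_mem]
    have : v - 0 = v := by ring
    rw [this]
    simp [PySem.Set.empty]
  have hlen : (PySem.List.len sentence) = (sentence.length : Int) := by simp
  have hd : ∀ v : Int,
      (if v > PySem.List.len sentence
       then PySem.List.pyGetD ((PySem.List.enumerate sentence 0).foldl pvBuildB ([0], 0, PySem.Set.empty)).1 (PySem.List.len sentence) 0
       else if v < 0 then 0
       else PySem.List.pyGetD ((PySem.List.enumerate sentence 0).foldl pvBuildB ([0], 0, PySem.Set.empty)).1 v 0)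
      = pvCnt sentence v := by
    intro v
    by_cases h1 : v > PySem.List.len sentence
    · rw [if_pos h1, hfst, hlen, PySem.List.pyGetD_natCast,
          pvPrefL_getD sentence 0 sentence.length (le_refl _),
          pvCnt_ge sentence v (by rw [hlen] at h1; omega)]
      ring
    · rw [if_neg h1]
      by_cases h2 : v < 0
      · rw [if_pos h2, pvCnt_nonpos sentence v (by omega)]
      · rw [if_neg h2, hfst]
        have hv : v = ((v.toNat : Nat) : Int) := (Int.toNat_of_nonneg (by omega)).symm
        rw [hv, PySem.List.pyGetD_natCast,
            pvPrefL_getD sentence 0 v.toNat (by rw [hlen] at h1; omega)]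
        rw [← hv]
        ring
  have key : ∀ l : List Int,
      pvProcA sentence 0 l
        = pvRemapB (PySem.List.len sentence)
            (PySem.List.pyGetD ((PySem.List.enumerate sentence 0).foldl pvBuildB ([0], 0, PySem.Set.empty)).1 (PySem.List.len sentence) 0)
            ((PySem.List.enumerate sentence 0).foldl pvBuildB ([0], 0, PySem.Set.empty)).1
            ((PySem.List.enumerate sentence 0).foldl pvBuildB ([0], 0, PySem.Set.empty)).2.2
            l := by
    intro l
    rw [pvProcA_eq_filterMap]
    unfold pvRemapB
    rw [pvRemapB_eq, List.nil_append]
    apply List.filterMap_congr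
    intro v _
    rw [pvF_closed, sub_zero, hd v]
    by_cases he : pvEmptyAt sentence v = true
    · have h0 : 0 ≤ v := by
        by_contra h
        rw [pvEmptyAt_neg sentence v (by omega)] at he
        simp at he
      rw [if_pos ⟨h0, he⟩, if_pos ((hmem v).mpr he)]
    · rw [if_neg (fun hc => he hc.2), if_neg (fun hc => he ((hmem v).mp hc))]
  show (pvProcA sentence 0 np, pvProcA sentence 0 g, pvProcA sentence 0 sp)
      = (pvRemapB _ _ _ _ np, pvRemapB _ _ _ _ g, pvRemapB _ _ _ _ sp)
  rw [key np, key g, key sp]
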